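-- pv_equiv track=rewrite | github.com/DNA-and-Natural-Algorithms-Group/nuskell | nuskell/interpreter/interpreter.py | strip_consecutive_strandbreaks
-- ===== SOURCE A (Python) =====
-- def strip_consecutive_strandbreaks(l):
--   """Make sure that there are no empty sequences.
--   """
--   flag = 1
--   res = []
--   for (x, y) in l:
--     if x == "+" and flag == 1: continue
--     if x == "+":
--       flag = 1
--     else:
--       flag = 0
--     res.append((x, y))
--   (x, y) = res[-1]
--   if x == "+": res = res[:-1]
--   return res
-- ===== SOURCE B (Python) =====
-- def strip_consecutive_strandbreaks(l):
--   """Staged rewrite: (1) chunk the list into maximal runs of strand-breaks /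
--   non-breaks; (2) rebuild: a break run contributes only its first tuple and a
--   leading break run contributes nothing, any other run is kept whole;
--   (3) drop a trailing break."""
--   groups = []
--   run = []
--   for p in l:
--     if run and (run[0][0] == "+") != (p[0] == "+"):
--       groups.append(run)
--       run = [p]
--     else:
--       run.append(p)
--   if run:
--     groups.append(run)
--   res = []
--   for i, g in enumerate(groups):
--     if g[0][0] == "+":
--       if i > 0:
--         res.append(g[0])
--     else:
--       res.extend(g)
--   (x, y) = res[-1]
--   if x == "+":
--     res = res[:-1]
--   return res
-- ===== Notes on version B (the rewrite author's own statement) =====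
-- stated objective: alternative
-- what changed: Replaces A's single stateful flag-loop by a staged pipeline: first chunk the list into maximal runs of breaks/non-breaks, then rebuild from the runs (a break run contributes only its first tuple, a leading break run nothing, other runs are copied whole), then drop a trailing break.
import Mathlib
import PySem

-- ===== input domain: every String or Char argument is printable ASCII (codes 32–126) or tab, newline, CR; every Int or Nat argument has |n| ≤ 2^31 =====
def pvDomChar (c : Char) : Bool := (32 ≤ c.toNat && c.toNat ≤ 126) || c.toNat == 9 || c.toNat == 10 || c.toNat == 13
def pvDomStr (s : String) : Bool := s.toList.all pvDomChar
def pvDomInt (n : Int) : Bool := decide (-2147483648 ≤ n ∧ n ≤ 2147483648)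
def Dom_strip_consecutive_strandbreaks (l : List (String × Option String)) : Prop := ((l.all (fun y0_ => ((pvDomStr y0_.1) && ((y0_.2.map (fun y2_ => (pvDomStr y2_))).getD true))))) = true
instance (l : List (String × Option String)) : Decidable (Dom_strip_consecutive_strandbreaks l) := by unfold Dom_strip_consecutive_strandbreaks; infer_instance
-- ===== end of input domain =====

-- B replaces A's stateful flag-loop by a staged pipeline (chunk into runs, rebuild from the runs, trim); same cost, different decomposition.


-- ===== PORT A =====
def strip_consecutive_strandbreaks (l : List (String × Option String)) : List (String × Option String) :=
  -- flag = 1; res = []; for (x, y) in l: …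
  let st := l.foldl (fun (st : Int × List (String × Option String)) p =>
      if p.1 = "+" ∧ st.1 = 1 then st
      else if p.1 = "+" then (1, st.2 ++ [p])
      else (0, st.2 ++ [p])) (1, [])
  let res := st.2
  -- (x, y) = res[-1]
  match PySem.List.pyGet? res (-1) with
  | none => []   -- Python raises IndexError here; excluded by Pre_
  | some (x, _) => if x = "+" then PySem.List.slice res none (some (-1)) else res

-- ===== PORT B =====
-- body of B's stage-1 loop: extend the pending run, or flush it on a break-status change
def pvStep1 (st : List (List (String × Option String)) × List (String × Option String))
    (p : String × Option String) :
    List (List (String × Option String)) × List (String × Option String) :=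
  match st.2 with
  | [] => (st.1, st.2 ++ [p])
  | q :: _ =>
    if decide (q.1 = "+") ≠ decide (p.1 = "+") then (st.1 ++ [st.2], [p])
    else (st.1, st.2 ++ [p])

-- body of B's stage-2 loop over enumerate(groups)
def pvStep2 (res : List (String × Option String))
    (ig : Int × List (String × Option String)) : List (String × Option String) :=
  match ig.2 with
  | [] => res   -- unreachable: every run is nonempty (Python's g[0] never raises here)
  | q :: g => if q.1 = "+" then (if ig.1 > 0 then res ++ [q] else res)
              else res ++ (q :: g)

def strip_consecutive_strandbreaks_alt (l : List (String × Option String)) : List (String × Option String) :=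
  -- stage 1: groups = []; run = []; for p in l: …  (chunk into maximal runs of equal break-status)
  let st := l.foldl pvStep1 ([], [])
  let groups := if st.2 = [] then st.1 else st.1 ++ [st.2]   -- if run: groups.append(run)
  -- stage 2: res = []; for i, g in enumerate(groups): …
  let res := (PySem.List.enumerate groups).foldl pvStep2 []
  -- stage 3: (x, y) = res[-1]; if x == "+": res = res[:-1]
  match PySem.List.pyGet? res (-1) with
  | none => res   -- Python raises IndexError here; excluded by Pre_
  | some (x, _) => if x = "+" then PySem.List.slice res none (some (-1)) else res

-- ===== PRECONDITION & SPEC =====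
-- Pre_ excludes exactly the inputs where every first component is "+" (incl. []): there both Pythons' res is empty and res[-1] raises IndexError.
def Pre_strip_consecutive_strandbreaks (l : List (String × Option String)) : Prop :=
  ∃ p ∈ l, p.1 ≠ "+"
instance (l : List (String × Option String)) : Decidable (Pre_strip_consecutive_strandbreaks l) := by
  unfold Pre_strip_consecutive_strandbreaks; infer_instance
def pvWitness_strip_consecutive_strandbreaks : (List (String × Option String)) :=
  [("a", some "x"), ("+", none), ("b", none)]

def Spec_strip_consecutive_strandbreaks (l : List (String × Option String)) (out : List (String × Option String)) : Prop := out = strip_consecutive_strandbreaks_alt l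
instance (l : List (String × Option String)) (out : List (String × Option String)) : Decidable (Spec_strip_consecutive_strandbreaks l out) := by unfold Spec_strip_consecutive_strandbreaks; infer_instance

-- ===== CLAIM (what is proved, stated in full; the proofs are below) =====
def Claim_equal_strip_consecutive_strandbreaks : Prop := ∀ (l : List (String × Option String)), Dom_strip_consecutive_strandbreaks l → Pre_strip_consecutive_strandbreaks l → Spec_strip_consecutive_strandbreaks l (strip_consecutive_strandbreaks l)

-- ===== LEMMAS AND PROOFS =====

-- The list both programs hold before the trailing-break step: keep an element
-- unless it is "+" and the previous one (flag f at the start) was "+" too.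
def pvKeep (f : Bool) : List (String × Option String) → List (String × Option String)
  | [] => []
  | p :: r =>
      if p.1 = "+" then (if f then pvKeep true r else p :: pvKeep true r)
      else p :: pvKeep false r

-- A's fold produces acc ++ pvKeep f l (flag 1 ↔ f = true).
theorem pvFold_eq_keep (l : List (String × Option String)) : ∀ (f : Bool) (acc : List (String × Option String)),
    (l.foldl (fun (st : Int × List (String × Option String)) p =>
      if p.1 = "+" ∧ st.1 = 1 then st
      else if p.1 = "+" then (1, st.2 ++ [p])
      else (0, st.2 ++ [p])) ((if f then 1 else 0 : Int), acc)).2 = acc ++ pvKeep f l := by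
  induction l with
  | nil => intro f acc; simp [pvKeep]
  | cons p r ih =>
    intro f acc
    by_cases hp : p.1 = "+"
    · cases f with
      | false =>
        simpa [List.foldl_cons, hp, pvKeep] using (ih true (acc ++ [p]))
      | true =>
        simpa [List.foldl_cons, hp, pvKeep] using (ih true acc)
    · simpa [List.foldl_cons, hp, pvKeep] using (ih false (acc ++ [p]))

-- Reference chunking: pvChunk b run l extends the current run `run` (whose head
-- has break-status b) through l, emitting a group at each status change.
def pvChunk (b : Bool) (run : List (String × Option String)) :
    List (String × Option String) → List (List (String × Option String))
  | [] => [run]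
  | p :: r => if decide (p.1 = "+") = b then pvChunk b (run ++ [p]) r
              else run :: pvChunk (decide (p.1 = "+")) [p] r

-- B's stage-1 fold, flushed, is pvChunk (and the pending run stays nonempty).
theorem pvStage1 (l : List (String × Option String)) :
    ∀ (gs : List (List (String × Option String))) (q : String × Option String)
      (run' : List (String × Option String)),
    (l.foldl pvStep1 (gs, q :: run')).2 ≠ [] ∧
    (l.foldl pvStep1 (gs, q :: run')).1 ++ [(l.foldl pvStep1 (gs, q :: run')).2]
      = gs ++ pvChunk (decide (q.1 = "+")) (q :: run') l := by
  induction l with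
  | nil => intro gs q run'; simp [pvChunk]
  | cons p r ih =>
    intro gs q run'
    by_cases h : decide (q.1 = "+") = decide (p.1 = "+")
    · have hstep : pvStep1 (gs, q :: run') p = (gs, q :: (run' ++ [p])) := by
        simp [pvStep1, h]
      have hch : pvChunk (decide (q.1 = "+")) (q :: run') (p :: r)
          = pvChunk (decide (q.1 = "+")) (q :: (run' ++ [p])) r := by
        simp [pvChunk, h.symm]
      have := ih gs q (run' ++ [p])
      rw [List.foldl_cons, hstep, hch]
      exact this
    · have := ih (gs ++ [q :: run']) p []
      simpa [List.foldl_cons, pvStep1, h, pvChunk, Ne.symm h, List.append_assoc] using this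

-- Every group pvChunk produces is nonempty.
theorem pvChunk_ne_nil (l : List (String × Option String)) :
    ∀ (b : Bool) (run : List (String × Option String)), run ≠ [] →
    ∀ g ∈ pvChunk b run l, g ≠ [] := by
  induction l with
  | nil => intro b run hr g hg; simp [pvChunk] at hg; simpa [hg]
  | cons p r ih =>
    intro b run hr g hg
    by_cases h : decide (p.1 = "+") = b
    · exact ih b (run ++ [p]) (by simp) g (by simpa [pvChunk, h] using hg)
    · rcases (by simpa [pvChunk, h] using hg : g = run ∨ g ∈ pvChunk (decide (p.1 = "+")) [p] r) with h1 | h1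
      · simpa [h1]
      · exact ih _ [p] (by simp) g h1

-- pvChunk never returns the empty group list.
theorem pvChunk_ne_nil_list (l : List (String × Option String)) :
    ∀ (b : Bool) (run : List (String × Option String)), pvChunk b run l ≠ [] := by
  induction l with
  | nil => intro b run; simp [pvChunk]
  | cons p r ih =>
    intro b run
    by_cases h : decide (p.1 = "+") = b
    · simpa [pvChunk, h] using ih b (run ++ [p])
    · simp [pvChunk, h]

-- Contribution of a non-leading group / the leading group in stage 2.
def pvContrib (g : List (String × Option String)) : List (String × Option String) :=
  match g with
  | [] => []
  | q :: g' => if q.1 = "+" then [q] else q :: g'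

def pvContrib0 (g : List (String × Option String)) : List (String × Option String) :=
  match g with
  | [] => []
  | q :: g' => if q.1 = "+" then [] else q :: g'

-- B's stage-2 fold over groups with index ≥ 1 concatenates pvContrib of each group.
theorem pvStage2Tail (gs : List (List (String × Option String))) :
    ∀ (s : Int) (res : List (String × Option String)), 1 ≤ s →
    (∀ g ∈ gs, g ≠ []) →
    (PySem.List.enumerate gs s).foldl pvStep2 res = res ++ (gs.map pvContrib).flatten := by
  induction gs with
  | nil => intro s res _ _; simp [PySem.List.enumerate_nil]
  | cons g gs ih =>
    intro s res hs hne
    obtain ⟨q, g', rfl⟩ : ∃ q g', g = q :: g' := by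
      cases g with
      | nil => exact absurd rfl (hne [] (by simp))
      | cons a b => exact ⟨a, b, rfl⟩
    rw [PySem.List.enumerate_cons, List.foldl_cons]
    by_cases hq : q.1 = "+"
    · simpa [pvStep2, hq, show (0:Int) < s by omega, pvContrib]
        using ih (s + 1) (res ++ [q]) (by omega) (fun g hg => hne g (by simp [hg]))
    · simpa [pvStep2, hq, pvContrib]
        using ih (s + 1) (res ++ (q :: g')) (by omega) (fun g hg => hne g (by simp [hg]))

-- Rebuilding from pvChunk's groups with pvContrib yields the run's head (or the
-- whole run) followed by pvKeep of the rest.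
theorem pvM (r : List (String × Option String)) :
    ∀ (q : String × Option String) (run' : List (String × Option String)),
    ((pvChunk (decide (q.1 = "+")) (q :: run') r).map pvContrib).flatten
      = (if q.1 = "+" then [q] else q :: run') ++ pvKeep (decide (q.1 = "+")) r := by
  induction r with
  | nil => intro q run'; by_cases hq : q.1 = "+" <;> simp [pvChunk, pvContrib, hq, pvKeep]
  | cons p r ih =>
    intro q run'
    by_cases hp : p.1 = "+" <;> by_cases hq : q.1 = "+"
    · simpa [pvChunk, hp, hq, pvKeep] using ih q (run' ++ [p])
    · have h := ih p []
      simp [pvChunk, hp, hq, pvKeep, pvContrib] at h ⊢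
      simp [h]
    · have h := ih p []
      simp [pvChunk, hp, hq, pvKeep, pvContrib] at h ⊢
      simp [h]
    · simpa [pvChunk, hp, hq, pvKeep] using ih q (run' ++ [p])

-- Same with the leading group contributing via pvContrib0: exactly pvKeep with leading breaks dropped.
theorem pvM0 (r : List (String × Option String)) :
    ∀ (q : String × Option String) (run' : List (String × Option String)),
    (match pvChunk (decide (q.1 = "+")) (q :: run') r with
     | [] => []
     | g :: gs => pvContrib0 g ++ (gs.map pvContrib).flatten)
      = (if q.1 = "+" then [] else q :: run') ++ pvKeep (decide (q.1 = "+")) r := by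
  induction r with
  | nil => intro q run'; by_cases hq : q.1 = "+" <;> simp [pvChunk, pvContrib0, hq, pvKeep]
  | cons p r ih =>
    intro q run'
    by_cases hp : p.1 = "+" <;> by_cases hq : q.1 = "+"
    · simpa [pvChunk, hp, hq, pvKeep] using ih q (run' ++ [p])
    · have h := pvM r p []
      simp [pvChunk, hp, hq, pvKeep, pvContrib0] at h ⊢
      simp [h]
    · have h := pvM r p []
      simp [pvChunk, hp, hq, pvKeep, pvContrib0] at h ⊢
      simp [h]
    · simpa [pvChunk, hp, hq, pvKeep] using ih q (run' ++ [p])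

-- pyGet? xs (-1) is none only on the empty list (the IndexError case).
theorem pvGetNeg1_none {α : Type} (xs : List α) (h : PySem.List.pyGet? xs (-1) = none) : xs = [] := by
  cases xs with
  | nil => rfl
  | cons a t => exact absurd h (by simp [PySem.List.pyGet?, PySem.List.pyIdx?])

-- B's pre-trim list equals pvKeep true l (A's pre-trim list).
theorem pvAlt_pre (l : List (String × Option String)) :
    (PySem.List.enumerate (
      (if (l.foldl pvStep1 ([], [])).2 = [] then (l.foldl pvStep1 ([], [])).1
       else (l.foldl pvStep1 ([], [])).1 ++ [(l.foldl pvStep1 ([], [])).2]))).foldl pvStep2 []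
    = pvKeep true l := by
  cases l with
  | nil => simp [pvKeep, PySem.List.enumerate_nil]
  | cons p r =>
    obtain ⟨hne, hflush⟩ := pvStage1 r [] p []
    have hfirst : (p :: r).foldl pvStep1 ([], []) = r.foldl pvStep1 ([], [p]) := by
      simp [List.foldl_cons, pvStep1]
    rw [hfirst, if_neg hne, hflush]
    simp only [List.nil_append]
    have hnil : ∀ g ∈ pvChunk (decide (p.1 = "+")) [p] r, g ≠ [] :=
      pvChunk_ne_nil r (decide (p.1 = "+")) [p] (by simp)
    cases hch : pvChunk (decide (p.1 = "+")) [p] r with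
    | nil => exact absurd hch (pvChunk_ne_nil_list r _ _)
    | cons g gs =>
      obtain ⟨q0, g', rfl⟩ : ∃ q0 g', g = q0 :: g' := by
        have := hnil _ (by rw [hch]; exact List.mem_cons_self ..)
        cases g with
        | nil => exact absurd rfl this
        | cons a b => exact ⟨a, b, rfl⟩
      have htail : ∀ g ∈ gs, g ≠ [] := fun g hg => hnil g (by rw [hch]; exact List.mem_cons_of_mem _ hg)
      have hM0 := pvM0 r p []
      rw [hch] at hM0
      have hM0' : pvContrib0 (q0 :: g') ++ (gs.map pvContrib).flatten
          = (if p.1 = "+" then [] else [p]) ++ pvKeep (decide (p.1 = "+")) r := hM0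
      rw [PySem.List.enumerate_cons, List.foldl_cons]
      have h2 : ∀ res, (PySem.List.enumerate gs 1).foldl pvStep2 res = res ++ (gs.map pvContrib).flatten :=
        fun res => pvStage2Tail gs 1 res (by omega) htail
      simp only [zero_add]
      by_cases hq0 : q0.1 = "+"
      · rw [show pvStep2 [] (0, q0 :: g') = [] by simp [pvStep2, hq0], h2]
        simp only [List.nil_append]
        have : pvContrib0 (q0 :: g') = [] := by simp [pvContrib0, hq0]
        rw [this, List.nil_append] at hM0'
        rw [hM0']
        by_cases hp : p.1 = "+" <;> simp [pvKeep, hp]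
      · rw [show pvStep2 [] (0, q0 :: g') = q0 :: g' by simp [pvStep2, hq0], h2]
        have : pvContrib0 (q0 :: g') = q0 :: g' := by simp [pvContrib0, hq0]
        rw [this] at hM0'
        rw [hM0']
        by_cases hp : p.1 = "+" <;> simp [pvKeep, hp]

theorem pvPorts_eq (l : List (String × Option String)) :
    strip_consecutive_strandbreaks l = strip_consecutive_strandbreaks_alt l := by
  unfold strip_consecutive_strandbreaks strip_consecutive_strandbreaks_alt
  have hA := pvFold_eq_keep l true []
  simp only [if_true, List.nil_append] at hA
  dsimp only
  rw [hA, pvAlt_pre l]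
  cases hK : PySem.List.pyGet? (pvKeep true l) (-1) with
  | none => simp [pvGetNeg1_none _ hK]
  | some p => rfl

-- ===== VERDICT (by name: the statement is the Claim_ definition above) =====
theorem strip_consecutive_strandbreaks_spec : Claim_equal_strip_consecutive_strandbreaks := by
  intro l _ _
  unfold Spec_strip_consecutive_strandbreaks
  exact pvPorts_eq l
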